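-- pv_equiv track=rewrite | github.com/datawire/testbench | testbench/mkosi/cli.py | strip_suffixes
-- ===== SOURCE A (Python) =====
-- def strip_suffixes(path: str) -> str:
--     t = path
--     while True:
--         if t.endswith(".xz"):
--             t = t[:-3]
--         elif t.endswith(".raw"):
--             t = t[:-4]
--         elif t.endswith(".tar"):
--             t = t[:-4]
--         elif t.endswith(".qcow2"):
--             t = t[:-6]
--         else:
--             break
--
--     return t
-- ===== SOURCE B (Python) =====
-- def strip_suffixes(path: str) -> str:
--     # Dynamic programme over positions: ok[i] says path[i:] is a concatenation
--     # of known suffixes; the answer is path[:best] for the leftmost ok position.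
--     sufs = (".xz", ".raw", ".tar", ".qcow2")
--     n = len(path)
--     ok = [False] * (n + 1)
--     ok[n] = True
--     best = n
--     for i in range(n - 1, -1, -1):
--         if any(i + len(s) <= n and ok[i + len(s)] and path.startswith(s, i) for s in sufs):
--             ok[i] = True
--             best = i
--     return path[:best]
-- ===== Notes on version B (the rewrite author's own statement) =====
-- stated objective: alternative
-- what changed: Replaces the repeated endswith-and-slice while-loop with a right-to-left dynamic programme marking every position whose tail is a concatenation of known suffixes, then returns the prefix up to the leftmost marked position.
import Mathlib
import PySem

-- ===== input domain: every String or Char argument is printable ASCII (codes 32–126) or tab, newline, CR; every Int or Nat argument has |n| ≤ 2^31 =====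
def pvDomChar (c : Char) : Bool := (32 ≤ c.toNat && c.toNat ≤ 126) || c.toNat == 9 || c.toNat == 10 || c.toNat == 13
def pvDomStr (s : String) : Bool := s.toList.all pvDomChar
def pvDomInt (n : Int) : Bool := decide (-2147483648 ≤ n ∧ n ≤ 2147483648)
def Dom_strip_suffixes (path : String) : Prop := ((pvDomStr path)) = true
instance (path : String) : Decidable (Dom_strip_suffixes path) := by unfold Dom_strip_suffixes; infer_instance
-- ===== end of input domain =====

-- B replaces A's repeated endswith/slice loop by a backward dynamic programme over
-- positions (alternative decomposition, same cost); return values proved equal on all inputs.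

-- ===== PORT A =====
-- the while-loop of A, as structural recursion on the character list (t[:-k] = slice none (-k))
def stripLoop (t : List Char) : List Char :=
  if PySem.Chars.endswith t ['.', 'x', 'z'] then
    stripLoop (PySem.List.slice t none (some (-3)))
  else if PySem.Chars.endswith t ['.', 'r', 'a', 'w'] then
    stripLoop (PySem.List.slice t none (some (-4)))
  else if PySem.Chars.endswith t ['.', 't', 'a', 'r'] then
    stripLoop (PySem.List.slice t none (some (-4)))
  else if PySem.Chars.endswith t ['.', 'q', 'c', 'o', 'w', '2'] then
    stripLoop (PySem.List.slice t none (some (-6)))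
  else t
termination_by t.length
decreasing_by
  · have h := (PySem.Chars.endswith_iff t ['.', 'x', 'z']).mp (by assumption)
    have := h.length_le
    rw [PySem.List.slice_to_neg_ofNat t 3 (by omega)]
    simp at this ⊢; omega
  · have h := (PySem.Chars.endswith_iff t ['.', 'r', 'a', 'w']).mp (by assumption)
    have := h.length_le
    rw [PySem.List.slice_to_neg_ofNat t 4 (by omega)]
    simp at this ⊢; omega
  · have h := (PySem.Chars.endswith_iff t ['.', 't', 'a', 'r']).mp (by assumption)
    have := h.length_le
    rw [PySem.List.slice_to_neg_ofNat t 4 (by omega)]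
    simp at this ⊢; omega
  · have h := (PySem.Chars.endswith_iff t ['.', 'q', 'c', 'o', 'w', '2']).mp (by assumption)
    have := h.length_le
    rw [PySem.List.slice_to_neg_ofNat t 6 (by omega)]
    simp at this ⊢; omega

def strip_suffixes (path : String) : String := String.ofList (stripLoop path.toList)

-- ===== PORT B =====
def sufsB : List (List Char) :=
  [['.', 'x', 'z'], ['.', 'r', 'a', 'w'], ['.', 't', 'a', 'r'], ['.', 'q', 'c', 'o', 'w', '2']]

-- Source B's backward loop: processing position i = prepending char c to the already
-- processed tail; returns (the ok table for positions i..n, best-i as an offset).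
-- Source B's bounds-guarded 'i+len(s) <= n and ok[i+len(s)]' is exactly 'getD (len s - 1) false'
-- on the tail's table (out of range reads the default false).
def bRun : List Char → List Bool × Nat
  | [] => ([true], 0)
  | c :: rest =>
    let p := bRun rest
    let hit := sufsB.any (fun s => s.isPrefixOf (c :: rest) && p.1.getD (s.length - 1) false)
    (hit :: p.1, if hit then 0 else p.2 + 1)

def strip_suffixes_alt (path : String) : String :=
  String.ofList (path.toList.take (bRun path.toList).2)

-- ===== PRECONDITION & SPEC =====
def Spec_strip_suffixes (path : String) (out : String) : Prop := out = strip_suffixes_alt path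
instance (path : String) (out : String) : Decidable (Spec_strip_suffixes path out) := by unfold Spec_strip_suffixes; infer_instance

-- ===== CLAIM (what is proved, stated in full; the proofs are below) =====
def Claim_equal_strip_suffixes : Prop := ∀ (path : String), Dom_strip_suffixes path → Spec_strip_suffixes path (strip_suffixes path)

-- ===== LEMMAS AND PROOFS =====

-- 'is a concatenation of known suffixes'
inductive SufStar : List Char → Prop
  | nil : SufStar []
  | cons (s u : List Char) : s ∈ sufsB → SufStar u → SufStar (s ++ u)

theorem star_snoc (u s : List Char) (hs : s ∈ sufsB) (h : SufStar u) : SufStar (u ++ s) := by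
  induction h with
  | nil => simpa using SufStar.cons s [] hs SufStar.nil
  | cons s' u' hs' _ ih => rw [List.append_assoc]; exact SufStar.cons s' (u' ++ s) hs' ih

theorem star_first (t : List Char) (h : SufStar t) (hne : t ≠ []) :
    ∃ s u, s ∈ sufsB ∧ t = s ++ u ∧ SufStar u := by
  cases h with
  | nil => exact absurd rfl hne
  | cons s u hs hu => exact ⟨s, u, hs, rfl, hu⟩

theorem star_last (t : List Char) (h : SufStar t) (hne : t ≠ []) :
    ∃ u s, s ∈ sufsB ∧ t = u ++ s ∧ SufStar u := by
  induction h with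
  | nil => exact absurd rfl hne
  | cons s u hs hu ih =>
    rcases Decidable.em (u = []) with h0 | h0
    · exact ⟨[], s, hs, by simp [h0], SufStar.nil⟩
    · obtain ⟨u', s', hs', heq, hu'⟩ := ih h0
      exact ⟨s ++ u', s', hs', by rw [heq, List.append_assoc], SufStar.cons s u' hs hu'⟩

theorem sufs_ne_nil (s : List Char) (hs : s ∈ sufsB) : s ≠ [] := by
  fin_cases hs <;> simp

theorem sufs_len_pos (s : List Char) (hs : s ∈ sufsB) : ∃ k, s.length = k + 1 := by
  fin_cases hs <;> exact ⟨_, rfl⟩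

theorem suffix_unique (s s' t : List Char) (hs : s ∈ sufsB) (hs' : s' ∈ sufsB)
    (h : s <:+ t) (h' : s' <:+ t) : s = s' := by
  have hl : s.getLast? = t.getLast? := by
    obtain ⟨u, rfl⟩ := h
    rw [List.getLast?_append_of_ne_nil _ (sufs_ne_nil s hs)]
  have hl' : s'.getLast? = t.getLast? := by
    obtain ⟨u, rfl⟩ := h'
    rw [List.getLast?_append_of_ne_nil _ (sufs_ne_nil s' hs')]
  have key : s.getLast? = s'.getLast? := hl.trans hl'.symm
  clear hl hl' h h'
  fin_cases hs <;> fin_cases hs' <;> simp_all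

theorem star_unappend (v s : List Char) (hs : s ∈ sufsB) (h : SufStar (v ++ s)) : SufStar v := by
  obtain ⟨w, s', hs', heq, hw⟩ :=
    star_last _ h (by simp [sufs_ne_nil s hs])
  have hss' : s' = s :=
    suffix_unique s' s (v ++ s) hs' hs ⟨w, heq.symm⟩ ⟨v, rfl⟩
  subst hss'
  obtain ⟨rfl, -⟩ := List.append_inj' heq.symm rfl
  exact hw

-- the any-condition Source B evaluates at position i (with c the character there)
def hitB (c : Char) (rest : List Char) : Bool :=
  sufsB.any (fun s => s.isPrefixOf (c :: rest) && (bRun rest).1.getD (s.length - 1) false)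

theorem bRun_cons_fst (c : Char) (rest : List Char) :
    (bRun (c :: rest)).1 = hitB c rest :: (bRun rest).1 := rfl

theorem bRun_cons_snd (c : Char) (rest : List Char) :
    (bRun (c :: rest)).2 = if hitB c rest = true then 0 else (bRun rest).2 + 1 := rfl

-- characterisation of B's dynamic programme
theorem bRun_spec (t : List Char) :
    (∀ j : Nat, ((bRun t).1.getD j false = true ↔ (j ≤ t.length ∧ SufStar (t.drop j)))) ∧
    (bRun t).2 ≤ t.length ∧ SufStar (t.drop (bRun t).2) ∧
    (∀ j, j < (bRun t).2 → ¬ SufStar (t.drop j)) := by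
  induction t with
  | nil =>
    refine ⟨fun j => ?_, by simp [bRun], by simpa [bRun] using SufStar.nil, by simp [bRun]⟩
    cases j with
    | zero => simp [bRun]; exact SufStar.nil
    | succ j' => simp [bRun]
  | cons c rest ih =>
    obtain ⟨ihTab, ihLe, ihStar, ihMin⟩ := ih
    have hit_iff : hitB c rest = true ↔ SufStar (c :: rest) := by
      constructor
      · intro h
        obtain ⟨s, hs, hf⟩ := List.any_eq_true.mp h
        simp only [Bool.and_eq_true] at hf
        obtain ⟨hp, hok⟩ := hf
        have hpre : s <+: (c :: rest) := List.isPrefixOf_iff_prefix.mp hp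
        obtain ⟨k, hk⟩ := sufs_len_pos s hs
        obtain ⟨-, hstar⟩ := (ihTab (s.length - 1)).mp hok
        have hdrop : rest.drop (s.length - 1) = (c :: rest).drop s.length := by
          rw [hk]; simp
        have hsplit : c :: rest = s ++ (c :: rest).drop s.length :=
          (List.prefix_iff_eq_append.mp hpre).symm
        rw [hsplit]
        exact SufStar.cons s _ hs (by rwa [hdrop] at hstar)
      · intro h
        obtain ⟨s, u, hs, heq, hu⟩ := star_first _ h (by simp)
        refine List.any_eq_true.mpr ⟨s, hs, ?_⟩
        simp only [Bool.and_eq_true]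
        obtain ⟨k, hk⟩ := sufs_len_pos s hs
        have hlen : rest.length + 1 = s.length + u.length := by
          have := congrArg List.length heq; simpa using this
        refine ⟨List.isPrefixOf_iff_prefix.mpr ⟨u, heq.symm⟩, (ihTab (s.length - 1)).mpr ⟨by omega, ?_⟩⟩
        have hdrop : rest.drop (s.length - 1) = (c :: rest).drop s.length := by
          rw [hk]; simp
        rw [hdrop, heq, List.drop_left]
        exact hu
    refine ⟨fun j => ?_, ?_, ?_, ?_⟩
    · cases j with
      | zero =>
        rw [bRun_cons_fst, List.getD_cons_zero]
        exact ⟨fun h => ⟨by simp, hit_iff.mp h⟩, fun ⟨_, h⟩ => hit_iff.mpr (by simpa using h)⟩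
      | succ j' =>
        rw [bRun_cons_fst, List.getD_cons_succ]
        rw [ihTab j']
        constructor
        · rintro ⟨h1, h2⟩; exact ⟨by simp; omega, by simpa using h2⟩
        · rintro ⟨h1, h2⟩; exact ⟨by simp at h1; omega, by simpa using h2⟩
    · by_cases hh : hitB c rest = true
      · rw [bRun_cons_snd, if_pos hh]; simp
      · rw [bRun_cons_snd, if_neg hh]; simp; omega
    · by_cases hh : hitB c rest = true
      · rw [bRun_cons_snd, if_pos hh]; simpa using hit_iff.mp hh
      · rw [bRun_cons_snd, if_neg hh]; simpa using ihStar
    · intro j hj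
      rw [bRun_cons_snd] at hj
      by_cases hh : hitB c rest = true
      · rw [if_pos hh] at hj; exact absurd hj (by omega)
      · rw [if_neg hh] at hj
        cases j with
        | zero => intro hst; exact hh (hit_iff.mpr (by simpa using hst))
        | succ j' => simpa using ihMin j' (by omega)

-- stripping one known suffix does not change the leftmost ok position
theorem bRun_append_suffix (u s : List Char) (hs : s ∈ sufsB) :
    (bRun (u ++ s)).2 = (bRun u).2 := by
  obtain ⟨-, tLe, tStar, tMin⟩ := bRun_spec (u ++ s)
  obtain ⟨-, uLe, uStar, uMin⟩ := bRun_spec u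
  have h1 : (bRun (u ++ s)).2 ≤ (bRun u).2 := by
    by_contra h
    exact tMin ((bRun u).2) (by omega)
      (by rw [List.drop_append_of_le_length uLe]; exact star_snoc _ _ hs uStar)
  have h2 : (bRun u).2 ≤ (bRun (u ++ s)).2 := by
    by_contra h
    refine uMin ((bRun (u ++ s)).2) (by omega) ?_
    have hb : (bRun (u ++ s)).2 ≤ u.length := by omega
    have hst := tStar
    rw [List.drop_append_of_le_length hb] at hst
    exact star_unappend _ _ hs hst
  omega

-- if no known suffix matches, no position below the length is ok
theorem bRun_no_suffix (t : List Char)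
    (h1 : ¬ (['.', 'x', 'z'] <:+ t)) (h2 : ¬ (['.', 'r', 'a', 'w'] <:+ t))
    (h3 : ¬ (['.', 't', 'a', 'r'] <:+ t)) (h4 : ¬ (['.', 'q', 'c', 'o', 'w', '2'] <:+ t)) :
    (bRun t).2 = t.length := by
  obtain ⟨-, tLe, tStar, -⟩ := bRun_spec t
  by_contra h
  have hlt : (bRun t).2 < t.length := by omega
  have hne : t.drop (bRun t).2 ≠ [] := by
    intro h0
    have := congrArg List.length h0
    simp at this; omega
  obtain ⟨w, s', hs', heq, -⟩ := star_last _ tStar hne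
  have hsuf : s' <:+ t := List.IsSuffix.trans ⟨w, heq.symm⟩ (List.drop_suffix _ _)
  fin_cases hs' <;> simp_all

theorem stripLoop_eq (t : List Char) : stripLoop t = t.take (bRun t).2 := by
  induction t using stripLoop.induct with
  | case1 t h ih =>
    obtain ⟨u, rfl⟩ := (PySem.Chars.endswith_iff _ _).mp h
    have hsl : PySem.List.slice (u ++ ['.', 'x', 'z']) none (some (-3)) = u := by
      rw [PySem.List.slice_to_neg_ofNat _ 3 (by omega)]; simp
    rw [hsl] at ih
    rw [stripLoop, if_pos h, hsl, ih, bRun_append_suffix u _ (by simp [sufsB]),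
      List.take_append_of_le_length (bRun_spec u).2.1]
  | case2 t h1 h ih =>
    obtain ⟨u, rfl⟩ := (PySem.Chars.endswith_iff _ _).mp h
    have hsl : PySem.List.slice (u ++ ['.', 'r', 'a', 'w']) none (some (-4)) = u := by
      rw [PySem.List.slice_to_neg_ofNat _ 4 (by omega)]; simp
    rw [hsl] at ih
    rw [stripLoop, if_neg h1, if_pos h, hsl, ih, bRun_append_suffix u _ (by simp [sufsB]),
      List.take_append_of_le_length (bRun_spec u).2.1]
  | case3 t h1 h2 h ih =>
    obtain ⟨u, rfl⟩ := (PySem.Chars.endswith_iff _ _).mp h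
    have hsl : PySem.List.slice (u ++ ['.', 't', 'a', 'r']) none (some (-4)) = u := by
      rw [PySem.List.slice_to_neg_ofNat _ 4 (by omega)]; simp
    rw [hsl] at ih
    rw [stripLoop, if_neg h1, if_neg h2, if_pos h, hsl, ih, bRun_append_suffix u _ (by simp [sufsB]),
      List.take_append_of_le_length (bRun_spec u).2.1]
  | case4 t h1 h2 h3 h ih =>
    obtain ⟨u, rfl⟩ := (PySem.Chars.endswith_iff _ _).mp h
    have hsl : PySem.List.slice (u ++ ['.', 'q', 'c', 'o', 'w', '2']) none (some (-6)) = u := by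
      rw [PySem.List.slice_to_neg_ofNat _ 6 (by omega)]; simp
    rw [hsl] at ih
    rw [stripLoop, if_neg h1, if_neg h2, if_neg h3, if_pos h, hsl, ih,
      bRun_append_suffix u _ (by simp [sufsB]),
      List.take_append_of_le_length (bRun_spec u).2.1]
  | case5 t h1 h2 h3 h4 =>
    rw [stripLoop, if_neg h1, if_neg h2, if_neg h3, if_neg h4,
      bRun_no_suffix t
        (fun h => h1 ((PySem.Chars.endswith_iff _ _).mpr h))
        (fun h => h2 ((PySem.Chars.endswith_iff _ _).mpr h))
        (fun h => h3 ((PySem.Chars.endswith_iff _ _).mpr h))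
        (fun h => h4 ((PySem.Chars.endswith_iff _ _).mpr h)),
      List.take_length]

-- ===== VERDICT (by name: the statement is the Claim_ definition above) =====
theorem strip_suffixes_spec : Claim_equal_strip_suffixes := by
  intro path _
  show strip_suffixes path = strip_suffixes_alt path
  unfold strip_suffixes strip_suffixes_alt
  rw [stripLoop_eq]
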